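-- pv_equiv track=rewrite | github.com/JaninduD001/C20 | main.py | powers_of_2
-- ===== SOURCE A (Python) =====
-- def powers_of_2(n):
--     powers = []
--     power = 0
--     while n:
--         if n % 2:
--             powers.append(2 ** power)
--         n //= 2
--         power += 1
--     return powers
-- ===== SOURCE B (Python) =====
-- def powers_of_2(n):
--     powers = []
--     while n:
--         cleared = n & (n - 1)      # n with its lowest set bit cleared
--         powers.append(n - cleared)  # the lowest set bit is itself the power of two
--         n = cleared
--     return powers
-- ===== Notes on version B (the rewrite author's own statement) =====
-- stated objective: alternative
-- what changed: B loops once per set bit, isolating and clearing the lowest set bit via n & (n - 1) and appending that bit directly, instead of A's per-bit-position loop that tests parity and computes an exponentiation with a power counter.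
import Mathlib
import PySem

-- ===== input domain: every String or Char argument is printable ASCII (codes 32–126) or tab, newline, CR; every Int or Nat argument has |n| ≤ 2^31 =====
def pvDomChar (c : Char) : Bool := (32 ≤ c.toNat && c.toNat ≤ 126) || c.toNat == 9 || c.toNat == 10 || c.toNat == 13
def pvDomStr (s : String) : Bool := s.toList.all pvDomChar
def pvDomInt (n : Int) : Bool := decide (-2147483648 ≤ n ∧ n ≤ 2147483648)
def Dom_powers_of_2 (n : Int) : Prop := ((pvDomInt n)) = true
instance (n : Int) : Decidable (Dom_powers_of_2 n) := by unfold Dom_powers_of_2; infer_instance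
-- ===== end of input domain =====

-- B replaces A's per-bit-position loop (test n % 2, compute 2 ** power) by a loop that runs once
-- per SET bit, isolating the lowest set bit via n & (n - 1); equivalence is proved for n ≥ 0
-- (for n < 0 both Pythons loop forever, excluded by Pre_).

-- ===== PORT A =====
-- Python's `while n:` loop; the stop test `n ≤ 0` agrees with Python's `n != 0` on every n ≥ 0
-- (Pre_); it only serves to make the Lean function total where Python diverges (n < 0).
-- `power`, Python's always-nonnegative loop counter, is carried as a Nat so `2 ** power` is `2 ^ power`.
def pvLoopA (n : Int) (power : Nat) (powers : List Int) : List Int :=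
  if n ≤ 0 then powers
  else
    pvLoopA (PySem.Int.floordiv n 2) (power + 1)
      (if PySem.Int.mod n 2 ≠ 0 then powers ++ [(2 : Int) ^ power] else powers)
termination_by n.toNat
decreasing_by
  rename_i h
  rw [PySem.Int.floordiv_eq_ediv_of_pos (by omega)]
  omega

def powers_of_2 (n : Int) : List Int := pvLoopA n 0 []

-- ===== PORT B =====
-- same `while n:` totalisation: stop test `n ≤ 0` equals Python's `n != 0` on all of Pre_.
def pvLoopB (n : Int) (powers : List Int) : List Int :=
  if n ≤ 0 then powers
  else
    let cleared := PySem.Int.band n (n - 1)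
    pvLoopB cleared (powers ++ [n - cleared])
termination_by n.toNat
decreasing_by
  rename_i h
  rw [PySem.Int.band_of_nonneg (by omega : (0:Int) ≤ n) (by omega : (0:Int) ≤ n - 1)]
  have := Nat.and_le_right (n := n.toNat) (m := (n - 1).toNat)
  omega

def powers_of_2_alt (n : Int) : List Int := pvLoopB n []

-- ===== PRECONDITION & SPEC =====
-- Pre_ excludes n < 0, on which the Python A (and B) never returns: n //= 2 is stuck at -1.
def Pre_powers_of_2 (n : Int) : Prop := 0 ≤ n
instance (n : Int) : Decidable (Pre_powers_of_2 n) := by unfold Pre_powers_of_2; infer_instance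
def pvWitness_powers_of_2 : Int := (13)
def Spec_powers_of_2 (n : Int) (out : List Int) : Prop := out = powers_of_2_alt n
instance (n : Int) (out : List Int) : Decidable (Spec_powers_of_2 n out) := by unfold Spec_powers_of_2; infer_instance

-- ===== CLAIM (what is proved, stated in full; the proofs are below) =====
def Claim_equal_powers_of_2 : Prop := ∀ (n : Int), Dom_powers_of_2 n → Pre_powers_of_2 n → Spec_powers_of_2 n (powers_of_2 n)

-- ===== LEMMAS AND PROOFS =====

-- clearing the lowest set bit, on Nat: the two shapes of n & (n-1) used below
theorem pvLand_odd_even (a b : Nat) : (2*a+1) &&& (2*b) = 2*(a &&& b) := by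
  apply Nat.eq_of_testBit_eq
  intro i
  rw [Nat.testBit_land]
  cases i with
  | zero => simp [Nat.mul_comm]
  | succ j =>
      rw [Nat.mul_comm 2 a, Nat.mul_comm 2 b, Nat.mul_comm 2 (a &&& b),
        Nat.testBit_succ, Nat.testBit_succ, Nat.testBit_succ]
      have h1 : (a*2+1)/2 = a := by omega
      have h2 : b*2/2 = b := by omega
      have h3 : (a &&& b)*2/2 = (a &&& b) := by omega
      rw [h1, h2, h3, Nat.testBit_land]

theorem pvLand_even_odd (a b : Nat) : (2*a) &&& (2*b+1) = 2*(a &&& b) := by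
  rw [Nat.land_comm, pvLand_odd_even, Nat.land_comm]

-- n odd: n & (n-1) = n - 1
theorem pvBand_odd (n : Int) (k : Nat) (hk : n = 2*(k:Int)+1) :
    PySem.Int.band n (n-1) = n - 1 := by
  have h0 : (0:Int) ≤ n := by omega
  have h1 : (0:Int) ≤ n - 1 := by omega
  rw [PySem.Int.band_of_nonneg h0 h1]
  have hn : n.toNat = 2*k+1 := by omega
  have hn1 : (n-1).toNat = 2*k := by omega
  rw [hn, hn1, pvLand_odd_even, Nat.and_self]
  omega

-- n = 2m, m ≥ 1: n & (n-1) = 2 * (m & (m-1))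
theorem pvBand_double (m : Int) (hm : 0 < m) :
    PySem.Int.band (2*m) (2*m-1) = 2 * PySem.Int.band m (m-1) := by
  have h0 : (0:Int) ≤ 2*m := by omega
  have h1 : (0:Int) ≤ 2*m - 1 := by omega
  rw [PySem.Int.band_of_nonneg h0 h1,
      PySem.Int.band_of_nonneg (by omega : (0:Int) ≤ m) (by omega : (0:Int) ≤ m - 1)]
  have h2 : (2*m).toNat = 2 * m.toNat := by omega
  have h3 : (2*m-1).toNat = 2 * (m.toNat - 1) + 1 := by omega
  rw [h2, h3, pvLand_even_odd]
  have h4 : (m-1).toNat = m.toNat - 1 := by omega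
  rw [h4]
  push_cast
  ring

theorem pvBand_nonneg (n : Int) (h : 0 < n) : 0 ≤ PySem.Int.band n (n-1) := by
  rw [PySem.Int.band_of_nonneg (by omega) (by omega)]
  positivity

theorem pvBand_lt (n : Int) (h : 0 < n) : PySem.Int.band n (n-1) < n := by
  rw [PySem.Int.band_of_nonneg (by omega) (by omega)]
  have := Nat.and_le_right (n := n.toNat) (m := (n - 1).toNat)
  omega

-- accumulator lemmas
theorem pvLoopA_acc (n : Int) (p : Nat) (acc : List Int) :
    pvLoopA n p acc = acc ++ pvLoopA n p [] := by
  by_cases h : n ≤ 0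
  · rw [pvLoopA, if_pos h, pvLoopA, if_pos h]; simp
  · rw [pvLoopA, if_neg h]
    conv_rhs => rw [pvLoopA, if_neg h]
    rw [pvLoopA_acc (PySem.Int.floordiv n 2) (p+1)
          (if PySem.Int.mod n 2 ≠ 0 then acc ++ [(2:Int) ^ p] else acc),
        pvLoopA_acc (PySem.Int.floordiv n 2) (p+1)
          (if PySem.Int.mod n 2 ≠ 0 then ([] : List Int) ++ [(2:Int) ^ p] else [])]
    split_ifs <;> simp
termination_by n.toNat
decreasing_by
  all_goals rw [PySem.Int.floordiv_eq_ediv_of_pos (by omega)]; omega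

theorem pvLoopB_acc (n : Int) (acc : List Int) :
    pvLoopB n acc = acc ++ pvLoopB n [] := by
  by_cases h : n ≤ 0
  · rw [pvLoopB, if_pos h, pvLoopB, if_pos h]; simp
  · rw [pvLoopB, if_neg h]
    conv_rhs => rw [pvLoopB, if_neg h]
    rw [pvLoopB_acc (PySem.Int.band n (n-1)) (acc ++ [n - PySem.Int.band n (n-1)]),
        pvLoopB_acc (PySem.Int.band n (n-1)) (([] : List Int) ++ [n - PySem.Int.band n (n-1)])]
    simp
termination_by n.toNat
decreasing_by
  all_goals
    rw [PySem.Int.band_of_nonneg (by omega : (0:Int) ≤ n) (by omega : (0:Int) ≤ n - 1)]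
    have := Nat.and_le_right (n := n.toNat) (m := (n - 1).toNat)
    omega

-- B's loop on a doubled input yields the doubled list
theorem pvLoopB_double (m : Int) (hm : 0 ≤ m) :
    pvLoopB (2*m) [] = (pvLoopB m []).map (fun x => 2 * x) := by
  by_cases h : m ≤ 0
  · rw [pvLoopB, if_pos (by omega : 2*m ≤ 0), pvLoopB, if_pos h]; simp
  · have hm1 : 0 < m := by omega
    rw [pvLoopB, if_neg (by omega : ¬ 2*m ≤ 0)]
    conv_rhs => rw [pvLoopB, if_neg h]
    simp only
    rw [pvBand_double m hm1]
    rw [pvLoopB_acc _ ([] ++ [2*m - 2 * PySem.Int.band m (m-1)]),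
        pvLoopB_acc _ ([] ++ [m - PySem.Int.band m (m-1)])]
    rw [pvLoopB_double (PySem.Int.band m (m-1)) (pvBand_nonneg m hm1)]
    simp
    ring
termination_by m.toNat
decreasing_by
  have := pvBand_lt m (by omega)
  have := pvBand_nonneg m (by omega)
  omega

-- main invariant: A's loop from exponent p equals B's list scaled by 2^p
theorem pvLoop_main (n : Int) (hn : 0 ≤ n) (p : Nat) :
    pvLoopA n p [] = (pvLoopB n []).map (fun x => (2:Int) ^ p * x) := by
  by_cases h : n ≤ 0
  · rw [pvLoopA, if_pos h, pvLoopB, if_pos h]; simp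
  · have hpos : 0 < n := by omega
    have hq := PySem.Int.floordiv_mul_add_mod n 2
    have hqn : 0 ≤ PySem.Int.floordiv n 2 := by
      rw [PySem.Int.floordiv_eq_ediv_of_pos (by omega)]; omega
    have hr0 : 0 ≤ PySem.Int.mod n 2 := PySem.Int.mod_nonneg n (show (0:Int) < 2 by omega)
    have hr2 : PySem.Int.mod n 2 < 2 := PySem.Int.mod_lt n (show (0:Int) < 2 by omega)
    rw [pvLoopA, if_neg h]
    rw [pvLoopA_acc, pvLoop_main (PySem.Int.floordiv n 2) hqn (p+1)]
    by_cases hodd : PySem.Int.mod n 2 ≠ 0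
    · -- n odd: n = 2q + 1
      have hr1 : PySem.Int.mod n 2 = 1 := by omega
      have hn1 : n = 2 * PySem.Int.floordiv n 2 + 1 := by omega
      conv_rhs => rw [pvLoopB, if_neg h]
      simp only
      rw [pvBand_odd n (PySem.Int.floordiv n 2).toNat (by omega)]
      rw [pvLoopB_acc _ ([] ++ [n - (n-1)])]
      have he : n - 1 = 2 * PySem.Int.floordiv n 2 := by omega
      rw [he, pvLoopB_double _ hqn]
      have hem : n % 2 = 1 := by
        rw [← PySem.Int.mod_eq_emod_of_pos (show (0:Int) < 2 by omega)]; exact hr1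
      simp [hem]
      exact ⟨by omega, fun a _ => Or.inl (by ring)⟩
    · -- n even: n = 2q
      have hn1 : n = 2 * PySem.Int.floordiv n 2 := by omega
      conv_rhs => rw [hn1]
      rw [pvLoopB_double _ hqn]
      simp only [if_neg hodd, List.nil_append, List.map_map]
      apply List.map_congr_left
      intro x _
      simp
      ring
termination_by n.toNat
decreasing_by
  rw [PySem.Int.floordiv_eq_ediv_of_pos (by omega)]
  omega

-- ===== VERDICT (by name: the statement is the Claim_ definition above) =====
theorem powers_of_2_spec : Claim_equal_powers_of_2 := by
  intro n _ hpre
  unfold Spec_powers_of_2 powers_of_2 powers_of_2_alt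
  rw [pvLoop_main n hpre 0]
  simp
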